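-- pv_equiv track=rewrite | github.com/cafaray/py4e | awsTags.py | subStringsKDist
-- ===== SOURCE A (Python) =====
-- def subStringsKDist(inputStr, num):
--     # WRITE YOUR CODE HERE
--     words = dict()
--     idx = 0
--     for idx in range(0, len(inputStr) - num + 1):
--         newstr = inputStr[idx:idx+num]
--         prospect = True
--         for i in range(0, num-1):
--             c = newstr[i]
--             if c in newstr[i+1:]:
--                 prospect = False
--                 break
--             else:
--                 continue
--         if prospect == True:
--             words[newstr] = words.get(newstr, 0) + 1
--     return list(words.keys())
-- ===== SOURCE B (Python) =====
-- def subStringsKDist(inputStr, num):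
--     # One pass: `dist` = length of the longest all-distinct suffix ending at r,
--     # maintained from the last occurrence of each character.
--     last = {}
--     dist = 0
--     out = {}
--     for r, c in enumerate(inputStr):
--         dist = min(dist + 1, r - last.get(c, -1))
--         last[c] = r
--         if dist >= num:
--             out[inputStr[r - num + 1:r + 1]] = None
--     return list(out.keys())
-- ===== Notes on version B (the rewrite author's own statement) =====
-- stated objective: faster
-- what changed: A re-checks every length-num window with a nested duplicate scan over each window; B makes a single left-to-right pass that maintains the last occurrence index of each character and the length of the longest all-distinct suffix, recording a window exactly when that length reaches num.
-- intended difference: For num <= 0, Python's negative-index wraparound makes A's empty window s[idx:idx+num] return phantom length-(len(s)+num) substrings when len(s)+num > 0 (and [''] on the empty string, where B's loop never runs); B returns [''] on a nonempty string and [] on the empty one, the intended value since no string has substrings of nonpositive length with distinct characters. — e.g. on subStringsKDist("ab", -1): A returns ["a", ""], B returns [""]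
import Mathlib
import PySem

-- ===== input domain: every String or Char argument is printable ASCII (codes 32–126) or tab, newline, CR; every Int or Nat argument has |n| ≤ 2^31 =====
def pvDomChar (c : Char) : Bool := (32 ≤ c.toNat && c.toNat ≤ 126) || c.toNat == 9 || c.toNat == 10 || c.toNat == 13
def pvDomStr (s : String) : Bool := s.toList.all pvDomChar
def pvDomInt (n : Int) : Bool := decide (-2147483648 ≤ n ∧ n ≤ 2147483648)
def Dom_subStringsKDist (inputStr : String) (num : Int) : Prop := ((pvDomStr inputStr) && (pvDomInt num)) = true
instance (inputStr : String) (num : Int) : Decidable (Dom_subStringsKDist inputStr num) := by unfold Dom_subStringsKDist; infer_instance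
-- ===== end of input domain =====

-- B replaces A's per-window nested duplicate scan by a single pass that maintains the length of the
-- longest all-distinct suffix (objective: faster, O(n·k²) → O(n)); on nonpositive num A's slices wrap
-- around via Python's negative indices (see D_ below) and B returns the intended value instead.

-- ===== PORT A =====
-- inner loop 'for i in range(0, num-1): c = newstr[i]; if c in newstr[i+1:]: prospect=False; break'
-- (pyGetD is exact here: i < num-1 and len(newstr) = num whenever the loop body runs, so Python never
-- raises; 'c in t' for the single character c is element membership, ported as isIn [c] t)
def aProspect (newstr : List Char) : List Int → Bool
  | [] => true
  | i :: rest =>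
    let c := PySem.List.pyGetD newstr i ' '
    if PySem.Chars.isIn [c] (PySem.List.slice newstr (some (i + 1)) none) then false
    else aProspect newstr rest

def subStringsKDist (inputStr : String) (num : Int) : List String :=
  let l := inputStr.toList
  let words : PySem.Dict (List Char) Int :=
    (PySem.List.pyRange 0 ((l.length : Int) - num + 1) 1).foldl
      (fun words idx =>
        let newstr := PySem.List.slice l (some idx) (some (idx + num))
        let prospect := aProspect newstr (PySem.List.pyRange 0 (num - 1) 1)
        if prospect = true then words.insert newstr (words.getD newstr 0 + 1) else words)
      PySem.Dict.empty
  words.keys.map String.ofList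

-- ===== PORT B =====
-- loop body of Source B: dist = min(dist+1, r - last.get(c,-1)); last[c] = r; if dist >= num: out[s[r-num+1:r+1]] = None
def bStep (l : List Char) (num : Int)
    (st : PySem.Dict Char Int × Int × PySem.Dict (List Char) Unit) (rc : Int × Char) :
    PySem.Dict Char Int × Int × PySem.Dict (List Char) Unit :=
  let (last, dist, out) := st
  let (r, c) := rc
  let dist' := min (dist + 1) (r - last.getD c (-1))
  let last' := last.insert c r
  let out' := if num ≤ dist' then
      out.insert (PySem.List.slice l (some (r - num + 1)) (some (r + 1))) () else out
  (last', dist', out')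

def subStringsKDist_alt (inputStr : String) (num : Int) : List String :=
  let l := inputStr.toList
  let st := (PySem.List.enumerate l 0).foldl (bStep l num) (PySem.Dict.empty, 0, PySem.Dict.empty)
  st.2.2.keys.map String.ofList

-- ===== PRECONDITION & SPEC =====
-- For num ≤ 0 the window s[idx:idx+num] is empty, but Python's negative-index wraparound makes A's
-- slice nonempty when idx+num < 0 < len(s)+num: A then returns phantom length-(len(s)+num) substrings
-- (and [''] on the empty string), while B returns the intended answer — [''] for a nonempty string,
-- [] for the empty one — since an empty window never yields a substring.
def D_subStringsKDist (inputStr : String) (num : Int) : Prop :=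
  (inputStr.toList = [] ∧ num ≤ 0) ∨ (num < 0 ∧ 0 < (inputStr.toList.length : Int) + num)
instance (inputStr : String) (num : Int) : Decidable (D_subStringsKDist inputStr num) := by
  unfold D_subStringsKDist; infer_instance

def Spec_subStringsKDist (inputStr : String) (num : Int) (out : List String) : Prop :=
  ¬ D_subStringsKDist inputStr num → out = subStringsKDist_alt inputStr num
instance (inputStr : String) (num : Int) (out : List String) :
    Decidable (Spec_subStringsKDist inputStr num out) := by unfold Spec_subStringsKDist; infer_instance

def pvDiffWitness_subStringsKDist : String × Int := ("ab", -1)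
def pvDiffWitnessOut_subStringsKDist : (List String) × (List String) := (["a", ""], [""])

-- ===== CLAIM (what is proved, stated in full; the proofs are below) =====
def Claim_unchanged_subStringsKDist : Prop := ∀ (inputStr : String) (num : Int),
  Dom_subStringsKDist inputStr num →
  Spec_subStringsKDist inputStr num (subStringsKDist inputStr num)
def Claim_changed_subStringsKDist : Prop :=
  Dom_subStringsKDist (pvDiffWitness_subStringsKDist.1) (pvDiffWitness_subStringsKDist.2) ∧
  D_subStringsKDist (pvDiffWitness_subStringsKDist.1) (pvDiffWitness_subStringsKDist.2) ∧
  subStringsKDist (pvDiffWitness_subStringsKDist.1) (pvDiffWitness_subStringsKDist.2) = pvDiffWitnessOut_subStringsKDist.1 ∧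
  subStringsKDist_alt (pvDiffWitness_subStringsKDist.1) (pvDiffWitness_subStringsKDist.2) = pvDiffWitnessOut_subStringsKDist.2 ∧
  pvDiffWitnessOut_subStringsKDist.1 ≠ pvDiffWitnessOut_subStringsKDist.2
def Claim_exact_subStringsKDist : Prop := ∀ (inputStr : String) (num : Int),
  Dom_subStringsKDist inputStr num → D_subStringsKDist inputStr num →
  subStringsKDist inputStr num ≠ subStringsKDist_alt inputStr num

-- ===== LEMMAS AND PROOFS =====

def lastOcc (c : Char) : List Char → Int
  | [] => -1
  | a :: t => if 0 ≤ lastOcc c t then lastOcc c t + 1 else if a = c then 0 else -1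

lemma lastOcc_ge (c : Char) (pre : List Char) : -1 ≤ lastOcc c pre := by
  induction pre with
  | nil => simp [lastOcc]
  | cons a t ih => simp only [lastOcc]; split_ifs <;> omega

lemma lastOcc_append (c a : Char) (pre : List Char) :
    lastOcc c (pre ++ [a]) = if a = c then (pre.length : Int) else lastOcc c pre := by
  induction pre with
  | nil => simp [lastOcc]
  | cons b t ih =>
    simp only [List.cons_append, lastOcc, ih, List.length_cons]
    have := lastOcc_ge c t
    split_ifs <;> push_cast <;> omega

lemma mem_drop_iff_lastOcc (c : Char) (pre : List Char) : ∀ (j : Nat),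
    c ∈ pre.drop j ↔ (j : Int) ≤ lastOcc c pre := by
  induction pre with
  | nil => intro j; simp [lastOcc]; omega
  | cons a t ih =>
    intro j
    match j with
    | 0 =>
      simp only [List.drop_zero, List.mem_cons, lastOcc, Nat.cast_zero]
      have h0 := (ih 0)
      have := lastOcc_ge c t
      split_ifs with h1 h2
      · simp at h0; constructor
        · intro _; omega
        · intro _; right; exact h0.mpr h1
      · subst h2; simp
      · simp at h0; constructor
        · rintro (h|h); · exact absurd h (by intro h; exact h2 h.symm) -- a = c?
          · exact absurd (h0.mp h) (by omega)
        · omega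
    | j+1 =>
      simp only [List.drop_succ_cons, lastOcc]
      rw [ih j]
      have := lastOcc_ge c t
      split_ifs <;> push_cast <;> omega

lemma lastOcc_lt_length (c : Char) (pre : List Char) : lastOcc c pre < pre.length := by
  have := (mem_drop_iff_lastOcc c pre pre.length)
  simp at this; omega

lemma pyRange_one_eq_nil {lo hi : Int} (h : hi ≤ lo) : PySem.List.pyRange lo hi 1 = [] := by
  have := @PySem.List.mem_pyRange_one
  apply List.eq_nil_iff_forall_not_mem.mpr
  intro x hx
  rw [PySem.List.mem_pyRange_one] at hx
  omega

lemma keys_insert_eq_add {κ ν : Type} [BEq κ] [LawfulBEq κ] (d : PySem.Dict κ ν) (k : κ) (v : ν) :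
    (d.insert k v).keys = PySem.Set.add d.keys k := by
  by_cases h : d.contains k = true
  · rw [PySem.Dict.keys_insert_of_contains _ v h, PySem.Set.add]
    rw [PySem.Dict.contains_iff_mem_keys] at h
    simp [PySem.Set.contains, h]
  · rw [PySem.Dict.keys_insert_of_not_contains _ v (by simpa using h), PySem.Set.add]
    rw [PySem.Dict.contains_iff_mem_keys] at h
    simp [PySem.Set.contains, h]

lemma ofList_append_singleton {α : Type} [BEq α] (xs : List α) (x : α) :
    PySem.Set.ofList (xs ++ [x]) = PySem.Set.add (PySem.Set.ofList xs) x := by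
  rw [PySem.Set.ofList_eq_foldl, PySem.Set.ofList_eq_foldl, List.foldl_append]
  rfl

lemma nodup_concat_iff {α : Type} (t : List α) (c : α) : (t ++ [c]).Nodup ↔ t.Nodup ∧ c ∉ t := by
  rw [List.nodup_append]
  constructor
  · rintro ⟨h1, -, h2⟩
    exact ⟨h1, fun hc => h2 c hc c (by simp) rfl⟩
  · rintro ⟨h1, h2⟩
    refine ⟨h1, List.nodup_singleton c, fun a ha b hb => ?_⟩
    simp only [List.mem_singleton] at hb
    subst hb
    exact fun h => h2 (h ▸ ha)

def DistInv (pre : List Char) (d : Int) : Prop :=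
  ∀ k : Nat, ((k : Int) ≤ d ↔ k ≤ pre.length ∧ (pre.drop (pre.length - k)).Nodup)

lemma distInv_nonneg {pre : List Char} {d : Int} (h : DistInv pre d) : 0 ≤ d := by
  have h0 := h 0
  simp at h0; exact h0

lemma distInv_step {pre : List Char} {d : Int} (c : Char) (h : DistInv pre d) :
    DistInv (pre ++ [c]) (min (d + 1) ((pre.length : Int) - lastOcc c pre)) := by
  have hL := lastOcc_lt_length c pre
  have hL1 := lastOcc_ge c pre
  have hd0 := distInv_nonneg h
  intro k
  match k with
  | 0 =>
    simp only [Nat.cast_zero, List.length_append, List.length_cons, List.length_nil]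
    constructor
    · intro _
      refine ⟨by omega, ?_⟩
      rw [List.drop_eq_nil_iff.mpr (by simp)]
      exact List.nodup_nil
    · intro _; omega
  | k' + 1 =>
    by_cases hk : k' ≤ pre.length
    · have hdrop : (pre ++ [c]).drop (pre.length + 1 - (k' + 1)) = pre.drop (pre.length - k') ++ [c] := by
        rw [show pre.length + 1 - (k' + 1) = pre.length - k' by omega,
          List.drop_append_of_le_length (by omega)]
      have hmem := mem_drop_iff_lastOcc c pre (pre.length - k')
      have hcast : ((pre.length - k' : Nat) : Int) = (pre.length : Int) - k' := by push_cast [hk]; ring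
      have hk' := h k'
      simp only [List.length_append, List.length_cons, List.length_nil, hdrop]
      rw [nodup_concat_iff]
      constructor
      · intro hle
        have h1 : (k' : Int) ≤ d := by omega
        have h2 := hk'.mp h1
        refine ⟨by omega, h2.2, ?_⟩
        intro hc2
        have := hmem.mp hc2
        push_cast at hle this ⊢
        omega
      · rintro ⟨-, hnd, hdisj⟩
        have h2 : (k' : Int) ≤ d := hk'.mpr ⟨hk, hnd⟩
        have h3 : ¬ ((pre.length - k' : Nat) : Int) ≤ lastOcc c pre := fun hc2 => hdisj (hmem.mpr hc2)
        push_cast at h3 ⊢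
        omega
    · constructor
      · intro hle
        have h1 : (k' : Int) ≤ d := by omega
        have := (h k').mp h1
        omega
      · intro h2
        simp at h2
        omega

def candB (l : List Char) (num : Int) (m : Nat) : List (List Char) :=
  (List.range m).filterMap (fun (r : Nat) =>
    if num ≤ (r : Int) + 1 ∧ ((l.take (r + 1)).drop (r + 1 - num.toNat)).Nodup
    then some (PySem.List.slice l (some ((r : Int) - num + 1)) (some ((r : Int) + 1))) else none)

lemma candB_succ (l : List Char) (num : Int) (m : Nat) :
    candB l num (m + 1) = candB l num m ++
      (if num ≤ (m : Int) + 1 ∧ ((l.take (m + 1)).drop (m + 1 - num.toNat)).Nodup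
       then [PySem.List.slice l (some ((m : Int) - num + 1)) (some ((m : Int) + 1))] else []) := by
  rw [candB, candB, List.range_succ, List.filterMap_append]
  congr 1
  split_ifs with h <;> simp [h]

lemma bFold (l : List Char) (num : Int) :
    ∀ (suf pre : List Char) (last : PySem.Dict Char Int) (dist : Int)
      (out : PySem.Dict (List Char) Unit),
      l = pre ++ suf →
      (∀ c, last.getD c (-1) = lastOcc c pre) →
      DistInv pre dist →
      out.keys = PySem.Set.ofList (candB l num pre.length) →
      ((PySem.List.enumerate suf (pre.length : Int)).foldl (bStep l num) (last, dist, out)).2.2.keys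
        = PySem.Set.ofList (candB l num l.length) := by
  intro suf
  induction suf with
  | nil =>
    intro pre last dist out hl hlast hDI hout
    simp only [PySem.List.enumerate_nil, List.foldl_nil]
    rw [hout, hl, List.append_nil]
  | cons ch suf ih =>
    intro pre last dist out hl hlast hDI hout
    rw [PySem.List.enumerate_cons, List.foldl_cons]
    have hstep : bStep l num (last, dist, out) ((pre.length : Int), ch) =
        (last.insert ch (pre.length : Int),
         min (dist + 1) ((pre.length : Int) - lastOcc ch pre),
         if num ≤ min (dist + 1) ((pre.length : Int) - lastOcc ch pre) then
           out.insert (PySem.List.slice l (some ((pre.length : Int) - num + 1))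
             (some ((pre.length : Int) + 1))) () else out) := by
      simp only [bStep, hlast ch]
    rw [hstep]
    have hl' : l = (pre ++ [ch]) ++ suf := by rw [hl]; simp
    have hDI' : DistInv (pre ++ [ch]) (min (dist + 1) ((pre.length : Int) - lastOcc ch pre)) :=
      distInv_step ch hDI
    have htake : l.take (pre.length + 1) = pre ++ [ch] := by
      rw [hl']
      exact List.take_left' (by simp)
    have hcond : (num ≤ min (dist + 1) ((pre.length : Int) - lastOcc ch pre)) ↔
        (num ≤ (pre.length : Int) + 1 ∧
          ((l.take (pre.length + 1)).drop (pre.length + 1 - num.toNat)).Nodup) := by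
      rw [htake]
      by_cases hnum : 0 < num
      · have hnn : ((num.toNat : Int)) = num := Int.toNat_of_nonneg (by omega)
        have hk := hDI' num.toNat
        simp only [List.length_append, List.length_cons, List.length_nil] at hk
        rw [hnn] at hk
        rw [hk]
        constructor
        · rintro ⟨h1, h2⟩; exact ⟨by push_cast; omega, h2⟩
        · rintro ⟨h1, h2⟩; exact ⟨by push_cast at h1 ⊢; omega, h2⟩
      · have h0 : 0 ≤ min (dist + 1) ((pre.length : Int) - lastOcc ch pre) := distInv_nonneg hDI'
        have hz : num.toNat = 0 := by omega
        constructor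
        · intro _
          refine ⟨by push_cast; omega, ?_⟩
          rw [hz, Nat.sub_zero, List.drop_eq_nil_iff.mpr (by simp)]
          exact List.nodup_nil
        · intro _; omega
    have hout' :
        (if num ≤ min (dist + 1) ((pre.length : Int) - lastOcc ch pre) then
           out.insert (PySem.List.slice l (some ((pre.length : Int) - num + 1))
             (some ((pre.length : Int) + 1))) () else out).keys
          = PySem.Set.ofList (candB l num (pre.length + 1)) := by
      rw [candB_succ]
      split_ifs with h1 h2
      · rw [keys_insert_eq_add, hout, ← ofList_append_singleton]
      · exact absurd (hcond.mp h1) h2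
      · exact absurd (hcond.mpr (by assumption)) h1
      · rw [hout, List.append_nil]
    have := ih (pre ++ [ch]) (last.insert ch (pre.length : Int))
      (min (dist + 1) ((pre.length : Int) - lastOcc ch pre)) _ hl'
      (fun c => by
        rw [PySem.Dict.getD_insert, lastOcc_append]
        by_cases hc : c = ch
        · simp [hc]
        · rw [if_neg hc, if_neg (fun h => hc h.symm), hlast c])
      hDI' (by simpa using hout')
    simpa using this

lemma isIn_singleton (c : Char) (t : List Char) : PySem.Chars.isIn [c] t = true ↔ c ∈ t := by
  rw [PySem.Chars.isIn_iff_infix]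
  exact List.singleton_infix_iff c t

lemma aProspect_drop : ∀ (n : Nat) (w : List Char) (a : Nat), w.length - a = n →
    aProspect w (PySem.List.pyRange (a : Int) ((w.length : Int) - 1) 1) = decide (w.drop a).Nodup := by
  intro n
  induction n with
  | zero =>
    intro w a h
    rw [pyRange_one_eq_nil (by omega), aProspect]
    rw [List.drop_eq_nil_iff.mpr (by omega)]
    simp
  | succ n ih =>
    intro w a h
    by_cases hlt : (a : Int) < (w.length : Int) - 1
    · rw [PySem.List.pyRange_one_cons hlt, aProspect]
      have ha : a < w.length := by omega
      have hget : PySem.List.pyGetD w (a : Int) ' ' = w[a] := by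
        rw [PySem.List.pyGetD_natCast, List.getD_eq_getElem _ _ ha]
      have hslice : PySem.List.slice w (some ((a : Int) + 1)) none = w.drop (a + 1) := by
        rw [show ((a : Int) + 1) = ((a + 1 : Nat) : Int) by push_cast; ring,
          PySem.List.slice_from_natCast]
      have hsplit : (w.drop a).Nodup ↔ (w[a] ∉ w.drop (a + 1) ∧ (w.drop (a + 1)).Nodup) := by
        rw [List.drop_eq_getElem_cons ha]
        exact List.nodup_cons
      simp only [hget, hslice]
      by_cases hmem : w[a] ∈ w.drop (a + 1)
      · rw [if_pos ((isIn_singleton _ _).mpr hmem)]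
        simp [hsplit, hmem]
      · rw [if_neg (by rw [isIn_singleton]; exact hmem)]
        rw [show ((a : Int) + 1) = ((a + 1 : Nat) : Int) by push_cast; ring,
          ih w (a + 1) (by omega)]
        simp [hsplit, hmem]
    · rw [pyRange_one_eq_nil (by omega), aProspect]
      have hle : w.length - a ≤ 1 := by omega
      match hd : w.drop a with
      | [] => simp
      | [x] => simp
      | x :: y :: t =>
        have := List.length_drop (i := a) (l := w)
        rw [hd] at this
        simp at this
        omega

lemma aProspect_eq_nodup (w : List Char) :
    aProspect w (PySem.List.pyRange 0 ((w.length : Int) - 1) 1) = decide w.Nodup := by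
  have := aProspect_drop w.length w 0 (by omega)
  simpa using this

def candA (l : List Char) (num : Int) : List (List Char) :=
  ((PySem.List.pyRange 0 ((l.length : Int) - num + 1) 1).filter
      (fun i => aProspect (PySem.List.slice l (some i) (some (i + num)))
        (PySem.List.pyRange 0 (num - 1) 1))).map
    (fun i => PySem.List.slice l (some i) (some (i + num)))

lemma a_eq_candA (inputStr : String) (num : Int) :
    subStringsKDist inputStr num
      = (PySem.Set.ofList (candA inputStr.toList num)).map String.ofList := by
  rw [subStringsKDist]
  congr 1
  rw [PySem.List.foldl_ite_eq_foldl_filter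
    (p := fun idx => aProspect (PySem.List.slice inputStr.toList (some idx) (some (idx + num)))
      (PySem.List.pyRange 0 (num - 1) 1) = true)]
  rw [PySem.Dict.keys_foldl_insert_key _
    (key := fun idx => PySem.List.slice inputStr.toList (some idx) (some (idx + num)))
    (f := fun d idx => d.getD (PySem.List.slice inputStr.toList (some idx) (some (idx + num))) 0 + 1)]
  rw [PySem.Dict.keys_empty, candA]
  simp [PySem.Set.update, PySem.Set.ofList_eq_foldl]

lemma alt_eq_candB (inputStr : String) (num : Int) :
    subStringsKDist_alt inputStr num
      = (PySem.Set.ofList (candB inputStr.toList num inputStr.toList.length)).map String.ofList := by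
  rw [subStringsKDist_alt]
  congr 1
  have := bFold inputStr.toList num inputStr.toList [] PySem.Dict.empty 0 PySem.Dict.empty
    (by simp)
    (fun c => by rw [PySem.Dict.getD_empty]; rfl)
    (fun k => by
      simp only [List.length_nil, List.drop_nil, Nat.cast_nonneg, List.nodup_nil, and_true]
      constructor
      · intro h; omega
      · intro h; exact_mod_cast Int.ofNat_le.mpr h)
    (by rw [PySem.Dict.keys_empty, candB]; simp)
  simpa using this

lemma slice_empty_nonneg (xs : List Char) (i j : Int) (h0 : 0 ≤ j) (h : j ≤ i) :
    PySem.List.slice xs (some i) (some j) = [] := by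
  simp only [PySem.List.slice, PySem.List.clampIdx]
  apply List.take_eq_nil_iff.mpr
  left
  split_ifs <;> omega

lemma slice_empty_wrap (xs : List Char) (i k : Int) (hi : 0 ≤ i) (hneg : i + k < 0)
    (h : (xs.length : Int) + k ≤ 0) :
    PySem.List.slice xs (some i) (some (i + k)) = [] := by
  simp only [PySem.List.slice, PySem.List.clampIdx]
  apply List.take_eq_nil_iff.mpr
  left
  split_ifs <;> omega

lemma filter_decide_map {α β : Type} (l : List α) (p : α → Prop) [DecidablePred p] (f : α → β) :
    (l.filter (fun x => decide (p x))).map f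
      = l.filterMap (fun x => if p x then some (f x) else none) := by
  induction l with
  | nil => rfl
  | cons a t ih =>
    rw [List.filter_cons, List.filterMap_cons]
    by_cases h : p a
    · simp [h, ih]
    · simp [h, ih]

lemma filterMap_all_some {α β : Type} (l : List α) (g : α → Option β) (x : β)
    (h : ∀ a ∈ l, g a = some x) : l.filterMap g = List.replicate l.length x := by
  induction l with
  | nil => rfl
  | cons a t ih =>
    rw [List.filterMap_cons, h a (by simp), List.length_cons, List.replicate_succ,
      ih (fun b hb => h b (by simp [hb]))]

lemma foldl_add_cons {α : Type} [BEq α] (t : List α) :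
    ∀ (s : List α) (x : α), ∃ s', List.foldl PySem.Set.add (x :: s) t = x :: s' := by
  induction t with
  | nil => intro s x; exact ⟨s, rfl⟩
  | cons a t ih =>
    intro s x
    rw [List.foldl_cons, PySem.Set.add]
    by_cases h : PySem.Set.contains (x :: s) a = true
    · rw [if_pos h]; exact ih s x
    · rw [if_neg h]
      exact ih (s ++ [a]) x

lemma ofList_cons {α : Type} [BEq α] (x : α) (t : List α) :
    ∃ s', PySem.Set.ofList (x :: t) = x :: s' := by
  rw [PySem.Set.ofList_eq_foldl, List.foldl_cons]
  exact foldl_add_cons t _ x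

lemma ofList_replicate {α : Type} [BEq α] [LawfulBEq α] (k : Nat) (x : α) (h : 1 ≤ k) :
    PySem.Set.ofList (List.replicate k x) = [x] := by
  obtain ⟨m, rfl⟩ : ∃ m, k = m + 1 := ⟨k - 1, by omega⟩
  rw [List.replicate_succ, PySem.Set.ofList_eq_foldl, List.foldl_cons]
  have hadd : PySem.Set.add ([] : PySem.Set α) x = [x] := rfl
  rw [hadd]
  induction m with
  | zero => rfl
  | succ m ih =>
    rw [List.replicate_succ, List.foldl_cons]
    have : PySem.Set.add [x] x = [x] := by
      rw [PySem.Set.add, if_pos (by simp [PySem.Set.contains])]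
    rw [this]
    exact ih (by omega)

lemma aProspect_nilRange (w : List Char) (num : Int) (h : num ≤ 1) :
    aProspect w (PySem.List.pyRange 0 (num - 1) 1) = true := by
  rw [pyRange_one_eq_nil (by omega), aProspect]

lemma candAB_pos (l : List Char) (num : Int) (hnum : 0 < num) (hn : num ≤ (l.length : Int)) :
    candA l num = candB l num l.length := by
  have hnn : ((num.toNat : Int)) = num := Int.toNat_of_nonneg (by omega)
  set n := l.length with hnl
  set K := n - num.toNat + 1 with hK
  have hKn : num.toNat ≤ n := by omega
  have hM : (n : Int) - num + 1 = ((K : Nat) : Int) := by omega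
  have hw : ∀ i : Nat, i < K →
      PySem.List.slice l (some (i : Int)) (some ((i : Int) + num))
        = (l.drop i).take num.toNat := by
    intro i hi
    rw [show ((i : Int) + num) = ((i : Int) + (num.toNat : Int)) by omega,
      PySem.List.slice_natCast_add]
  have hwlen : ∀ i : Nat, i < K → ((l.drop i).take num.toNat).length = num.toNat := by
    intro i hi
    simp only [List.length_take, List.length_drop]
    omega
  have hBside : candB l num n = (List.range K).filterMap
      (fun x : Nat => if (List.take num.toNat (List.drop x l)).Nodup
        then some (List.take num.toNat (List.drop x l)) else none) := by
    rw [candB, show n = (num.toNat - 1) + K by omega, List.range_add, List.filterMap_append]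
    have h1 : (List.range (num.toNat - 1)).filterMap (fun (r : Nat) =>
        if num ≤ (r : Int) + 1 ∧ ((l.take (r + 1)).drop (r + 1 - num.toNat)).Nodup
        then some (PySem.List.slice l (some ((r : Int) - num + 1)) (some ((r : Int) + 1)))
        else none) = [] := by
      apply List.filterMap_eq_nil_iff.mpr
      intro r hr
      rw [List.mem_range] at hr
      rw [if_neg (by rintro ⟨h1, -⟩; omega)]
    rw [h1, List.nil_append, List.filterMap_map]
    apply List.filterMap_congr
    intro j hj
    rw [List.mem_range] at hj
    simp only [Function.comp_apply]
    have hr1 : (num.toNat - 1 + j) + 1 = num.toNat + j := by omega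
    have hcond : num ≤ ((num.toNat - 1 + j : Nat) : Int) + 1 := by push_cast; omega
    have hdt : ((l.take (num.toNat - 1 + j + 1)).drop (num.toNat - 1 + j + 1 - num.toNat))
        = (l.drop j).take num.toNat := by
      rw [hr1, show num.toNat + j - num.toNat = j by omega, List.drop_take,
        show num.toNat + j - j = num.toNat by omega]
    have hsl : PySem.List.slice l (some (((num.toNat - 1 + j : Nat) : Int) - num + 1))
        (some (((num.toNat - 1 + j : Nat) : Int) + 1)) = (l.drop j).take num.toNat := by
      rw [show (((num.toNat - 1 + j : Nat) : Int) - num + 1) = ((j : Nat) : Int) by push_cast; omega,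
        show (((num.toNat - 1 + j : Nat) : Int) + 1) = ((j : Nat) : Int) + ((num.toNat : Nat) : Int) by push_cast; omega,
        PySem.List.slice_natCast_add]
    by_cases hnd : ((l.drop j).take num.toNat).Nodup
    · rw [if_pos ⟨hcond, by rw [hdt]; exact hnd⟩, if_pos hnd, hsl]
    · rw [if_neg (by rintro ⟨-, h2⟩; rw [hdt] at h2; exact hnd h2), if_neg hnd]
  rw [candA, hM, PySem.List.pyRange_zero_natCast, List.filter_map, List.map_map]
  rw [List.filter_congr (q := fun i : Nat => decide ((l.drop i).take num.toNat).Nodup)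
    (by
      intro i hi
      rw [List.mem_range] at hi
      simp only [Function.comp_apply]
      rw [hw i hi, show num - 1 = ((((l.drop i).take num.toNat).length : Int) - 1) by
        rw [hwlen i hi]; omega, aProspect_eq_nodup])]
  rw [List.map_congr_left (g := fun i : Nat => (l.drop i).take num.toNat)
    (by
      intro i hi
      rw [List.mem_filter, List.mem_range] at hi
      exact hw i hi.1)]
  rw [filter_decide_map, hBside]

lemma candA_eq_candB (l : List Char) (num : Int)
    (hD : ¬ ((l = [] ∧ num ≤ 0) ∨ (num < 0 ∧ 0 < (l.length : Int) + num))) :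
    PySem.Set.ofList (candA l num) = PySem.Set.ofList (candB l num l.length) := by
  by_cases hnum : 0 < num
  · by_cases hn : num ≤ (l.length : Int)
    · rw [candAB_pos l num hnum hn]
    · rw [candA,
        pyRange_one_eq_nil (show ((l.length : Int) - num + 1) ≤ 0 by omega)]
      simp only [List.filter_nil, List.map_nil]
      have hBnil : candB l num l.length = [] := by
        rw [candB]
        apply List.filterMap_eq_nil_iff.mpr
        intro r hr
        rw [List.mem_range] at hr
        rw [if_neg (by rintro ⟨h1, -⟩; omega)]
      rw [hBnil]
  · -- num ≤ 0 : every window is empty on both sides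
    have hne : l ≠ [] := fun h => hD (Or.inl ⟨h, by omega⟩)
    have hwrap : (l.length : Int) + num ≤ 0 ∨ num = 0 := by
      by_cases h0 : num = 0
      · exact Or.inr h0
      · exact Or.inl (by
          by_contra hc
          exact hD (Or.inr ⟨by omega, by omega⟩))
    have hn1 : 1 ≤ l.length := List.length_pos_iff.mpr hne
    have hA : candA l num
        = List.replicate (PySem.List.pyRange 0 ((l.length : Int) - num + 1) 1).length [] := by
      rw [candA, List.filter_congr (q := fun _ => true) (by
        intro i hi
        exact aProspect_nilRange _ num (by omega))]
      rw [List.filter_true]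
      apply List.eq_replicate_iff.mpr
      refine ⟨by rw [List.length_map], ?_⟩
      intro b hb
      rw [List.mem_map] at hb
      obtain ⟨i, hi, rfl⟩ := hb
      rw [PySem.List.mem_pyRange_one] at hi
      by_cases hiw : 0 ≤ i + num
      · exact slice_empty_nonneg l i (i + num) hiw (by omega)
      · rcases hwrap with h | h
        · exact slice_empty_wrap l i num (by omega) (by omega) (by omega)
        · omega
    have hB : candB l num l.length = List.replicate (List.range l.length).length [] := by
      rw [candB]
      refine filterMap_all_some _ _ _ ?_
      intro r hr
      rw [List.mem_range] at hr
      rw [if_pos ⟨by omega, by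
          rw [Int.toNat_of_nonpos (by omega), Nat.sub_zero,
            List.drop_eq_nil_iff.mpr (by simp)]
          exact List.nodup_nil⟩]
      rw [slice_empty_nonneg l _ _ (by omega) (by omega)]
    have hlenA : 1 ≤ (PySem.List.pyRange 0 ((l.length : Int) - num + 1) 1).length := by
      have h0 : (0 : Int) ∈ PySem.List.pyRange 0 ((l.length : Int) - num + 1) 1 := by
        rw [PySem.List.mem_pyRange_one]
        omega
      have := List.length_pos_of_mem h0
      omega
    rw [hA, hB, ofList_replicate _ _ hlenA,
      ofList_replicate _ _ (by rw [List.length_range]; omega)]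

lemma alt_of_numneg (s : String) (num : Int) (hnum : num ≤ 0) (hne : 1 ≤ s.toList.length) :
    subStringsKDist_alt s num = [""] := by
  rw [alt_eq_candB]
  have hB : candB s.toList num s.toList.length
      = List.replicate (List.range s.toList.length).length [] := by
    rw [candB]
    refine filterMap_all_some _ _ _ ?_
    intro r hr
    rw [List.mem_range] at hr
    rw [if_pos ⟨by omega, by
        rw [Int.toNat_of_nonpos (by omega), Nat.sub_zero,
          List.drop_eq_nil_iff.mpr (by simp)]
        exact List.nodup_nil⟩]
    rw [slice_empty_nonneg s.toList _ _ (by omega) (by omega)]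
  rw [hB, ofList_replicate _ _ (by rw [List.length_range]; omega)]
  rfl

lemma a_ne_b_on_D : ∀ (inputStr : String) (num : Int),
    ((inputStr.toList = [] ∧ num ≤ 0) ∨ (num < 0 ∧ 0 < (inputStr.toList.length : Int) + num)) →
    subStringsKDist inputStr num ≠ subStringsKDist_alt inputStr num := by
  intro s num hD
  rcases hD with ⟨hnil, hnum⟩ | ⟨hnum, hlen⟩
  · -- empty string, num ≤ 0 : A = [""], B = []
    have hB : subStringsKDist_alt s num = [] := by
      rw [alt_eq_candB, hnil, candB]
      simp
    have hA : subStringsKDist s num = [""] := by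
      rw [a_eq_candA, hnil]
      have hcand : candA [] num
          = List.replicate (PySem.List.pyRange 0 ((0 : Int) - num + 1) 1).length [] := by
        rw [candA, List.filter_congr (q := fun _ => true) (by
          intro i hi
          exact aProspect_nilRange _ num (by omega))]
        rw [List.filter_true]
        apply List.eq_replicate_iff.mpr
        refine ⟨by simp, ?_⟩
        intro b hb
        rw [List.mem_map] at hb
        obtain ⟨i, hi, rfl⟩ := hb
        rw [PySem.List.mem_pyRange_one] at hi
        by_cases hiw : 0 ≤ i + num
        · exact slice_empty_nonneg [] i (i + num) hiw (by omega)
        · exact slice_empty_wrap [] i num (by omega) (by omega) (by simp; omega)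
      simp only [List.length_nil] at hcand ⊢
      rw [hcand, ofList_replicate _ _ (by
        have h0 : (0 : Int) ∈ PySem.List.pyRange 0 ((0 : Int) - num + 1) 1 := by
          rw [PySem.List.mem_pyRange_one]; omega
        have := List.length_pos_of_mem h0
        omega)]
      rfl
    rw [hA, hB]
    simp
  · -- negative num with wraparound : A starts with a nonempty phantom window, B = [""]
    set l := s.toList with hls
    have hn1 : 1 ≤ l.length := by omega
    have hB : subStringsKDist_alt s num = [""] := alt_of_numneg s num (by omega) hn1
    -- head of candA
    have hM : (0 : Int) < (l.length : Int) - num + 1 := by omega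
    have hw0 : PySem.List.slice l (some 0) (some (0 + num)) = l.take (l.length - (-num).toNat) := by
      rw [show (0 : Int) + num = -(((-num).toNat : Nat) : Int) by omega]
      rw [PySem.List.slice_zero_start, PySem.List.slice_to_neg_natCast _ _ (by omega)]
    have hw0ne : l.take (l.length - (-num).toNat) ≠ [] := by
      apply List.ne_nil_of_length_pos
      rw [List.length_take]
      omega
    have hcand : ∃ rest, candA l num = l.take (l.length - (-num).toNat) :: rest := by
      rw [candA, PySem.List.pyRange_one_cons hM,
        List.filter_cons_of_pos (by exact aProspect_nilRange _ num (by omega)),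
        List.map_cons, hw0]
      exact ⟨_, rfl⟩
    obtain ⟨rest, hcand⟩ := hcand
    rw [a_eq_candA, hls.symm, hcand]
    obtain ⟨t, ht⟩ := ofList_cons (l.take (l.length - (-num).toNat)) rest
    rw [ht, List.map_cons, hB]
    intro hcontr
    have hhead : String.ofList (l.take (l.length - (-num).toNat)) = "" := by
      have := congrArg (fun xs => xs.headI) hcontr
      simpa using this
    have := congrArg String.toList hhead
    rw [String.toList_ofList] at this
    exact hw0ne (by simpa using this)


-- ===== VERDICT (by name: the statement is the Claim_ definition above) =====
theorem subStringsKDist_spec : Claim_unchanged_subStringsKDist := by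
  intro inputStr num _ hnd
  rw [a_eq_candA, alt_eq_candB]
  exact congrArg _ (candA_eq_candB _ _ (fun h => hnd h))

theorem subStringsKDist_changed : Claim_changed_subStringsKDist := by
  unfold Claim_changed_subStringsKDist; decide

theorem subStringsKDist_tight : Claim_exact_subStringsKDist := by
  intro inputStr num _ hD
  exact a_ne_b_on_D inputStr num hD
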